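-- pv_equiv track=rewrite | github.com/pypi-data/pypi-mirror-359 | packages/dialup/dialup-1.0.1.tar.gz/dialup-1.0.1/src/dialup/denoisers/main.py | add_punctuation_back
-- ===== SOURCE A (Python) =====
-- def add_punctuation_back(input_word, mapped_word, punct = ".,!?।\"”"):
--     prefix_punct = ""
--     suffix_punct = ""
--     for char in input_word:
--         if char in punct:
--             prefix_punct += char
--         else:
--             break
--     for char in reversed(input_word):
--         if char in punct:
--             suffix_punct = char + suffix_punct
--         else:
--             break
--     mapped_word = prefix_punct + mapped_word + suffix_punct
--     return mapped_word
-- ===== SOURCE B (Python) =====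
-- def add_punctuation_back(input_word, mapped_word, punct = ".,!?।\"”"):
--     prefix = input_word[:len(input_word) - len(input_word.lstrip(punct))]
--     suffix = input_word[len(input_word.rstrip(punct)):]
--     return prefix + mapped_word + suffix
-- ===== Notes on version B (the rewrite author's own statement) =====
-- stated objective: faster
-- what changed: Replaces the two char-by-char accumulation loops (with break) by computing the punctuation-run boundaries via str.lstrip/str.rstrip and slicing the original string once.
import Mathlib
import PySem

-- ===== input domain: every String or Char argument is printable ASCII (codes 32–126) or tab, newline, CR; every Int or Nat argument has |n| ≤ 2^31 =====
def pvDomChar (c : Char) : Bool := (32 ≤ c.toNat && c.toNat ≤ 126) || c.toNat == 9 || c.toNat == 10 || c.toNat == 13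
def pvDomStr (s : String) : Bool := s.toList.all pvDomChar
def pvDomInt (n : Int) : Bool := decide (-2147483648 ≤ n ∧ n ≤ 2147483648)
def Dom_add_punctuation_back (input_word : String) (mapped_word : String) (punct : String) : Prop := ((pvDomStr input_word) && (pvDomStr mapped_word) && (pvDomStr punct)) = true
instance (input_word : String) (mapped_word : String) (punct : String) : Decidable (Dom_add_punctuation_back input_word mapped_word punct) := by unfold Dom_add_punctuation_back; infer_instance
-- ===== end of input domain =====

-- B finds the punctuation-run boundaries with lstrip/rstrip and slices, instead of
-- accumulating prefix/suffix characters one at a time (objective: idiomatic).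

-- ===== PORT A =====
-- 'for char in input_word: if char in punct: prefix_punct += char else: break'
def apbPrefixLoop (pl : List Char) : List Char → List Char → List Char
  | acc, [] => acc
  | acc, c :: rest => if pl.contains c then apbPrefixLoop pl (acc ++ [c]) rest else acc

-- 'for char in reversed(input_word): if char in punct: suffix_punct = char + suffix_punct else: break'
def apbSuffixLoop (pl : List Char) : List Char → List Char → List Char
  | acc, [] => acc
  | acc, c :: rest => if pl.contains c then apbSuffixLoop pl ([c] ++ acc) rest else acc

def add_punctuation_back (input_word : String) (mapped_word : String) (punct : String) : String :=
  let pl := punct.toList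
  let prefix_punct := apbPrefixLoop pl [] input_word.toList
  let suffix_punct := apbSuffixLoop pl [] input_word.toList.reverse
  String.ofList (prefix_punct ++ mapped_word.toList ++ suffix_punct)

-- ===== PORT B =====
-- s.lstrip(chars) / s.rstrip(chars): exact hand port (Python strips nothing when chars = "")
def pyLstrip (s chars : List Char) : List Char := s.dropWhile (fun c => chars.contains c)
def pyRstrip (s chars : List Char) : List Char := (s.reverse.dropWhile (fun c => chars.contains c)).reverse

def add_punctuation_back_alt (input_word : String) (mapped_word : String) (punct : String) : String :=
  let l := input_word.toList
  let pl := punct.toList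
  -- input_word[:len(input_word)-len(input_word.lstrip(punct))]  (index is in [0, len], so take is exact)
  let pre := l.take (l.length - (pyLstrip l pl).length)
  -- input_word[len(input_word.rstrip(punct)):]  (index is in [0, len], so drop is exact)
  let suf := l.drop (pyRstrip l pl).length
  String.ofList (pre ++ mapped_word.toList ++ suf)

-- ===== PRECONDITION & SPEC =====
def Spec_add_punctuation_back (input_word : String) (mapped_word : String) (punct : String) (out : String) : Prop := out = add_punctuation_back_alt input_word mapped_word punct
instance (input_word : String) (mapped_word : String) (punct : String) (out : String) : Decidable (Spec_add_punctuation_back input_word mapped_word punct out) := by unfold Spec_add_punctuation_back; infer_instance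

-- ===== CLAIM (what is proved, stated in full; the proofs are below) =====
def Claim_equal_add_punctuation_back : Prop := ∀ (input_word : String) (mapped_word : String) (punct : String), Dom_add_punctuation_back input_word mapped_word punct → Spec_add_punctuation_back input_word mapped_word punct (add_punctuation_back input_word mapped_word punct)

-- ===== LEMMAS AND PROOFS =====
theorem apbPrefixLoop_eq (pl : List Char) : ∀ (l acc : List Char),
    apbPrefixLoop pl acc l = acc ++ l.takeWhile (fun c => pl.contains c) := by
  intro l
  induction l with
  | nil => intro acc; simp [apbPrefixLoop]
  | cons c rest ih =>
    intro acc
    by_cases h : c ∈ pl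
    · simp [apbPrefixLoop, h, ih]
    · simp [apbPrefixLoop, h]

theorem apbSuffixLoop_eq (pl : List Char) : ∀ (l acc : List Char),
    apbSuffixLoop pl acc l = (l.takeWhile (fun c => pl.contains c)).reverse ++ acc := by
  intro l
  induction l with
  | nil => intro acc; simp [apbSuffixLoop]
  | cons c rest ih =>
    intro acc
    by_cases h : c ∈ pl
    · simp [apbSuffixLoop, h, ih]
    · simp [apbSuffixLoop, h]

theorem tw_dw_length (p : Char → Bool) (l : List Char) :
    (l.takeWhile p).length + (l.dropWhile p).length = l.length := by
  rw [← List.length_append, List.takeWhile_append_dropWhile]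

theorem take_sub_dropWhile (p : Char → Bool) (l : List Char) :
    l.take (l.length - (l.dropWhile p).length) = l.takeWhile p := by
  rw [← tw_dw_length p l, Nat.add_sub_cancel]
  exact (List.prefix_iff_eq_take.mp (List.takeWhile_prefix p)).symm

theorem drop_rstrip (p : Char → Bool) (l : List Char) :
    l.drop ((l.reverse.dropWhile p).reverse).length = (l.reverse.takeWhile p).reverse := by
  have hsuf : (l.reverse.takeWhile p).reverse <:+ l := by
    conv_rhs => rw [← l.reverse_reverse]
    exact List.reverse_suffix.mpr (List.takeWhile_prefix p)
  have h := List.suffix_iff_eq_drop.mp hsuf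
  have hs := tw_dw_length p l.reverse
  rw [List.length_reverse] at hs
  have hlen : l.length - (l.reverse.takeWhile p).reverse.length = (l.reverse.dropWhile p).length := by
    rw [List.length_reverse]; omega
  rw [hlen] at h
  rw [List.length_reverse]
  exact h.symm

-- ===== VERDICT (by name: the statement is the Claim_ definition above) =====
theorem add_punctuation_back_spec : Claim_equal_add_punctuation_back := by
  intro iw mw p _
  unfold Spec_add_punctuation_back add_punctuation_back add_punctuation_back_alt
  simp only [apbPrefixLoop_eq, apbSuffixLoop_eq, pyLstrip, pyRstrip,
    take_sub_dropWhile, drop_rstrip, List.nil_append, List.append_nil]
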